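-- pv_equiv track=rewrite | github.com/Anunay0501/coding_problems | Leetcode-1498-Number_of_Subsequences_That_Satisfy_the_Given_Sum_Condition.py | numSubseq
-- ===== SOURCE A (Python) =====
-- from typing import List
--
-- def numSubseq(nums: List[int], target: int) -> int:
--     nums.sort()
--     n = len(nums)
--     l, r = 0, n-1
--     res, mod = 0, 7 + 10**9
--     while l <= r:
--         if nums[l] + nums[r] > target:
--             r -= 1
--         else:
--             res += pow(2, r-l, mod)
--             l += 1
--     return res % mod
-- ===== SOURCE B (Python) =====
-- from typing import List
--
-- def numSubseq(nums: List[int], target: int) -> int: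
--     # Sort in place (same mutation as A), then for each left index do an
--     # independent binary search for the last element <= target - nums[l].
--     nums.sort()
--     n = len(nums)
--     mod = 10**9 + 7
--     res = 0
--     for l in range(n):
--         bound = target - nums[l]
--         lo, hi = 0, n
--         while lo < hi:
--             m = (lo + hi) // 2
--             if nums[m] <= bound:
--                 lo = m + 1
--             else:
--                 hi = m
--         if lo - 1 >= l:
--             res += pow(2, lo - 1 - l, mod)
--     return res % mod
-- ===== Notes on version B (the rewrite author's own statement) =====
-- stated objective: alternative
-- what changed: Replaces A's coordinated two-pointer sweep with an independent hand-written binary search per left index (last element <= target - nums[l]) plus a modular power per hit; both sort the list in place.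
import Mathlib
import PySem

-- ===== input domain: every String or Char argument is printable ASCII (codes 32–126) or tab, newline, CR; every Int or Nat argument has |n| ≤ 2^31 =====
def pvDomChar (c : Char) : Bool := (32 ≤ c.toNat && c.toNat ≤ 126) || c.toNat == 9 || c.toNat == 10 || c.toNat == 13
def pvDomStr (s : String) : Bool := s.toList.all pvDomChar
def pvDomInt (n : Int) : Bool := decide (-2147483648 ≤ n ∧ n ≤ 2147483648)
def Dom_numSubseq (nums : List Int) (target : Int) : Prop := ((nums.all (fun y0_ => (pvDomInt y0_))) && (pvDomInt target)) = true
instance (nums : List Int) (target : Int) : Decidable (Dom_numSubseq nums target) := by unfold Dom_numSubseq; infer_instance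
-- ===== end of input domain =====

-- B replaces A's coordinated two-pointer sweep by an independent binary search per left
-- index (objective: alternative decomposition, same O(n log n) cost); both versions sort
-- the argument list — in Python that in-place mutation is identical in A and B, and the
-- equivalence proved here is about the return value.

-- ===== PORT A =====
-- the while-loop of A: l, r two pointers, res accumulator; fuel is a totality device
-- (fuel = r - l + 1 at the call site bounds the number of iterations, which shrinks by 1 each step)
def numSubseqLoop (nums : List Int) (target : Int) (fuel : Nat) (l r res : Int) : Int :=
  match fuel with
  | 0 => res
  | fuel + 1 =>
    if l ≤ r then
      if PySem.List.pyGetD nums l 0 + PySem.List.pyGetD nums r 0 > target then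
        numSubseqLoop nums target fuel l (r - 1) res
      else
        numSubseqLoop nums target fuel (l + 1) r (res + PySem.Int.powMod 2 (r - l).toNat (7 + 10 ^ 9))
    else res

def numSubseq (nums : List Int) (target : Int) : Int :=
  let s := PySem.List.sorted nums (fun x => x)
  let n := PySem.List.len s
  PySem.Int.mod (numSubseqLoop s target n.toNat 0 (n - 1) 0) (7 + 10 ^ 9)

-- ===== PORT B =====
-- Source B's hand-written while-loop binary search (first index whose element exceeds bound);
-- fuel is a totality device (fuel = hi - lo at the call site; hi - lo shrinks every step)
def numSubseqSearch (s : List Int) (bound : Int) (fuel : Nat) (lo hi : Int) : Int :=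
  match fuel with
  | 0 => lo
  | fuel + 1 =>
    if lo < hi then
      let m := PySem.Int.floordiv (lo + hi) 2
      if PySem.List.pyGetD s m 0 ≤ bound then numSubseqSearch s bound fuel (m + 1) hi
      else numSubseqSearch s bound fuel lo m
    else lo

def numSubseq_alt (nums : List Int) (target : Int) : Int :=
  let s := PySem.List.sorted nums (fun x => x)
  let n := PySem.List.len s
  let res := (PySem.List.pyRange 0 n).foldl (fun res l =>
    let bound := target - PySem.List.pyGetD s l 0
    let lo := numSubseqSearch s bound n.toNat 0 n
    if lo - 1 ≥ l then res + PySem.Int.powMod 2 (lo - 1 - l).toNat (10 ^ 9 + 7) else res) 0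
  PySem.Int.mod res (10 ^ 9 + 7)

-- ===== PRECONDITION & SPEC =====
def Spec_numSubseq (nums : List Int) (target : Int) (out : Int) : Prop := out = numSubseq_alt nums target
instance (nums : List Int) (target : Int) (out : Int) : Decidable (Spec_numSubseq nums target out) := by unfold Spec_numSubseq; infer_instance

-- ===== CLAIM (what is proved, stated in full; the proofs are below) =====
def Claim_equal_numSubseq : Prop := ∀ (nums : List Int) (target : Int), Dom_numSubseq nums target → Spec_numSubseq nums target (numSubseq nums target)

-- ===== LEMMAS AND PROOFS =====

-- binary-search midpoint bounds
theorem pvMid_lb {lo hi : Int} (h : lo < hi) : lo ≤ PySem.Int.floordiv (lo + hi) 2 :=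
  (PySem.Int.le_floordiv_iff_mul_le (by omega)).mpr (by omega)
theorem pvMid_ub {lo hi : Int} (h : lo < hi) : PySem.Int.floordiv (lo + hi) 2 < hi :=
  (PySem.Int.floordiv_lt_iff_lt_mul (by omega)).mpr (by omega)

-- proof-only abbreviations
def pvG (s : List Int) (i : Int) : Int := PySem.List.pyGetD s i 0
-- B's binary-search result for left index i
def pvC (s : List Int) (target i : Int) : Int :=
  numSubseqSearch s (target - pvG s i) s.length 0 (s.length : Int)
-- the contribution of left index i in B
def pvF (s : List Int) (target i : Int) : Int :=
  if pvC s target i - 1 ≥ i then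
    PySem.Int.powMod 2 (pvC s target i - 1 - i).toNat (10 ^ 9 + 7)
  else 0
-- sum of the contributions of the k indices a, a+1, …, a+k-1
def pvSum (s : List Int) (target : Int) (a k : Nat) : Int :=
  match k with
  | 0 => 0
  | k + 1 => pvF s target a + pvSum s target (a + 1) k
-- sum of the contributions of indices a, …, length-1
def pvSumFrom (s : List Int) (target : Int) (a : Nat) : Int :=
  pvSum s target a (s.length - a)

-- monotonicity hypothesis shape used throughout
def pvMono (s : List Int) : Prop :=
  ∀ i j : Int, 0 ≤ i → i ≤ j → j < (s.length : Int) → pvG s i ≤ pvG s j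

theorem pvMono_sorted (nums : List Int) : pvMono (PySem.List.sorted nums (fun x => x)) := by
  intro i j h0 hij hj
  have h0j : (0:Int) ≤ j := le_trans h0 hij
  rw [pvG, pvG, PySem.List.pyGetD_eq_getElem _ _ h0 (by omega),
      PySem.List.pyGetD_eq_getElem _ _ h0j hj]
  exact PySem.List.sorted_id_getElem_mono nums (by omega) (by omega)

theorem pvSearch_spec (s : List Int) (bound : Int) (hm : pvMono s) :
    ∀ (fuel : Nat) (lo hi : Int), (hi - lo).toNat ≤ fuel →
    0 ≤ lo → lo ≤ hi → hi ≤ (s.length : Int) →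
    (∀ j : Int, 0 ≤ j → j < lo → pvG s j ≤ bound) →
    (∀ j : Int, hi ≤ j → j < (s.length : Int) → bound < pvG s j) →
    (∀ j : Int, 0 ≤ j → j < numSubseqSearch s bound fuel lo hi → pvG s j ≤ bound) ∧
    (∀ j : Int, numSubseqSearch s bound fuel lo hi ≤ j → j < (s.length : Int) → bound < pvG s j) ∧
    0 ≤ numSubseqSearch s bound fuel lo hi ∧ numSubseqSearch s bound fuel lo hi ≤ (s.length : Int) := by
  intro fuel
  induction fuel with
  | zero =>
    intro lo hi hfuel h0 hlh hn hlow hhigh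
    have heq : hi = lo := by omega
    subst heq
    exact ⟨hlow, fun j hj hjn => hhigh j hj hjn, h0, hn⟩
  | succ fuel ih =>
    intro lo hi hfuel h0 hlh hn hlow hhigh
    simp only [numSubseqSearch]
    by_cases hlt : lo < hi
    · rw [if_pos hlt]
      have hml := pvMid_lb hlt
      have hmu := pvMid_ub hlt
      by_cases hc : PySem.List.pyGetD s (PySem.Int.floordiv (lo + hi) 2) 0 ≤ bound
      · rw [if_pos hc]
        refine ih (PySem.Int.floordiv (lo + hi) 2 + 1) hi (by omega) (by omega) (by omega) hn ?_ hhigh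
        intro j hj0 hjm
        exact le_trans (hm j (PySem.Int.floordiv (lo + hi) 2) hj0 (by omega) (by omega)) hc
      · rw [if_neg hc]
        refine ih lo (PySem.Int.floordiv (lo + hi) 2) (by omega) h0 (by omega) (by omega) hlow ?_
        intro j hmj hjn
        exact lt_of_lt_of_le (not_le.mp hc) (hm (PySem.Int.floordiv (lo + hi) 2) j (by omega) hmj hjn)
    · rw [if_neg hlt]
      exact ⟨hlow, fun j hj hjn => hhigh j (by omega) hjn, h0, by omega⟩

theorem pvC_spec (s : List Int) (target i : Int) (hm : pvMono s) :
    (∀ j : Int, 0 ≤ j → j < pvC s target i → pvG s j ≤ target - pvG s i) ∧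
    (∀ j : Int, pvC s target i ≤ j → j < (s.length : Int) → target - pvG s i < pvG s j) ∧
    0 ≤ pvC s target i ∧ pvC s target i ≤ (s.length : Int) := by
  have h := pvSearch_spec s (target - pvG s i) hm s.length 0 (s.length : Int) (by omega)
    le_rfl (by exact_mod_cast Int.natCast_nonneg s.length) le_rfl
    (by omega) (by omega)
  exact h

theorem pvC_eq (s : List Int) (target i r : Int) (hm : pvMono s)
    (h0 : 0 ≤ r) (hr : r < (s.length : Int))
    (hle : pvG s i + pvG s r ≤ target)
    (hgt : ∀ j : Int, r < j → j < (s.length : Int) → target < pvG s i + pvG s j) :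
    pvC s target i = r + 1 := by
  obtain ⟨p3, p4, pc0, pcn⟩ := pvC_spec s target i hm
  by_contra hne
  rcases lt_or_gt_of_ne hne with h | h
  · have := p4 r (by omega) hr
    omega
  · have hrn : r + 1 < (s.length : Int) := by omega
    have h1 := p3 (r + 1) (by omega) (by omega)
    have h2 := hgt (r + 1) (by omega) hrn
    omega

theorem pvF_zero (s : List Int) (target i : Int) (hm : pvMono s)
    (h0 : 0 ≤ i) (h2 : target < pvG s i + pvG s i) :
    pvF s target i = 0 := by
  obtain ⟨p3, p4, pc0, pcn⟩ := pvC_spec s target i hm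
  rw [pvF]
  have hci : pvC s target i ≤ i := by
    by_contra hc
    have := p3 i h0 (by omega)
    omega
  rw [if_neg (by omega)]

theorem pvSum_zero (s : List Int) (target : Int) :
    ∀ (k a : Nat), (∀ j : Nat, a ≤ j → j < a + k → pvF s target j = 0) →
    pvSum s target a k = 0 := by
  intro k
  induction k with
  | zero => intro a _; rfl
  | succ k ih =>
    intro a hz
    rw [pvSum, hz a le_rfl (by omega), ih (a + 1) (fun j hj hjk => hz j (by omega) (by omega))]
    ring

theorem pvSumFrom_zero (s : List Int) (target : Int) (a : Nat)
    (hz : ∀ j : Nat, a ≤ j → j < s.length → pvF s target j = 0) :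
    pvSumFrom s target a = 0 := by
  rw [pvSumFrom]
  exact pvSum_zero s target (s.length - a) a (fun j hj hjk => hz j hj (by omega))

theorem pvSumFrom_step (s : List Int) (target : Int) (a : Nat) (h : a < s.length) :
    pvSumFrom s target a = pvF s target a + pvSumFrom s target (a + 1) := by
  rw [pvSumFrom, pvSumFrom]
  have hk : s.length - a = (s.length - (a + 1)) + 1 := by omega
  rw [hk, pvSum]

theorem pvLoopA_eq (s : List Int) (target : Int) (hm : pvMono s) :
    ∀ (fuel : Nat) (l r res : Int), (r - l + 1).toNat ≤ fuel →
    0 ≤ l → r < (s.length : Int) →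
    (∀ j : Int, r < j → j < (s.length : Int) → target < pvG s l + pvG s j) →
    numSubseqLoop s target fuel l r res = res + pvSumFrom s target l.toNat := by
  have hdone : ∀ (l r res : Int), 0 ≤ l → r < (s.length : Int) → r < l →
      (∀ j : Int, r < j → j < (s.length : Int) → target < pvG s l + pvG s j) →
      res = res + pvSumFrom s target l.toNat := by
    intro l r res h0 hr hlr hinv
    rw [pvSumFrom_zero s target l.toNat]
    · ring
    · intro k hk hkn
      have hkn' : ((k : Nat) : Int) < (s.length : Int) := by omega
      refine pvF_zero s target k hm (by omega) ?_
      have h1 := hinv k (by omega) hkn'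
      have h2 := hm l k h0 (by omega) hkn'
      omega
  intro fuel
  induction fuel with
  | zero =>
    intro l r res hfuel h0 hr hinv
    exact hdone l r res h0 hr (by omega) hinv
  | succ fuel ih =>
    intro l r res hfuel h0 hr hinv
    simp only [numSubseqLoop]
    by_cases hlr : l ≤ r
    · rw [if_pos hlr]
      by_cases hgt : PySem.List.pyGetD s l 0 + PySem.List.pyGetD s r 0 > target
      · rw [if_pos hgt]
        refine ih l (r - 1) res (by omega) h0 (by omega) ?_
        intro j hj hjn
        rcases eq_or_lt_of_le (by omega : r ≤ j) with h | h
        · subst h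
          have hx : target < pvG s l + pvG s r := hgt
          omega
        · exact hinv j h hjn
      · rw [if_neg hgt]
        have hle' : pvG s l + pvG s r ≤ target := not_lt.mp hgt
        have hCl : pvC s target l = r + 1 := pvC_eq s target l r hm (by omega) hr hle' hinv
        have hinv' : ∀ j : Int, r < j → j < (s.length : Int) → target < pvG s (l + 1) + pvG s j := by
          intro j hj hjn
          have hmono := hm l (l + 1) h0 (by omega) (by omega)
          have := hinv j hj hjn
          omega
        rw [ih (l + 1) r _ (by omega) (by omega) hr hinv']
        have hF : pvF s target ((l.toNat : Nat) : Int) = PySem.Int.powMod 2 (r - l).toNat (10 ^ 9 + 7) := by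
          rw [pvF]
          have hl : ((l.toNat : Nat) : Int) = l := by omega
          rw [hl, hCl, if_pos (by omega)]
          congr 1
          omega
        have hsucc : (l + 1).toNat = l.toNat + 1 := by omega
        rw [hsucc, pvSumFrom_step s target l.toNat (by omega), hF]
        have hmodeq : (7 + 10 ^ 9 : Int) = 10 ^ 9 + 7 := by norm_num
        rw [hmodeq]
        ring
    · rw [if_neg hlr]
      exact hdone l r res h0 hr (by omega) hinv

def pvBody (s : List Int) (target : Int) : Int → Int → Int := fun res l =>
  if numSubseqSearch s (target - PySem.List.pyGetD s l 0) s.length 0 (s.length : Int) - 1 ≥ l then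
    res + PySem.Int.powMod 2
      (numSubseqSearch s (target - PySem.List.pyGetD s l 0) s.length 0 (s.length : Int) - 1 - l).toNat
      (10 ^ 9 + 7)
  else res

theorem pvBody_eq (s : List Int) (target res : Int) (a : Int) :
    pvBody s target res a = res + pvF s target a := by
  rw [pvBody, pvF, pvC, pvG]
  split_ifs with h
  · rfl
  · ring

theorem pvFoldB_eq (s : List Int) (target : Int) :
    ∀ (k a : Nat) (res : Int), s.length ≤ a + k →
    (PySem.List.pyRange (a : Int) (s.length : Int)).foldl (pvBody s target) res
      = res + pvSumFrom s target a := by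
  intro k
  induction k with
  | zero =>
    intro a res hk
    have h0 : (((s.length : Int)) - (a : Int)).toNat = 0 := by omega
    rw [PySem.List.pyRange_one, h0]
    rw [pvSumFrom_zero s target a (fun j hj hjn => by omega)]
    simp
  | succ k ih =>
    intro a res hk
    by_cases h : a < s.length
    · rw [PySem.List.pyRange_one_cons (by exact_mod_cast h), List.foldl_cons, pvBody_eq]
      have hc : ((a : Int) + 1) = ((a + 1 : Nat) : Int) := by push_cast; ring
      rw [hc, ih (a + 1) (res + pvF s target (a : Int)) (by omega)]
      rw [pvSumFrom_step s target a h]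
      ring
    · have h0 : (((s.length : Int)) - (a : Int)).toNat = 0 := by omega
      rw [PySem.List.pyRange_one, h0]
      rw [pvSumFrom_zero s target a (fun j hj hjn => by omega)]
      simp

-- ===== VERDICT (by name: the statement is the Claim_ definition above) =====
theorem numSubseq_spec : Claim_equal_numSubseq := by
  intro nums target _
  unfold Spec_numSubseq numSubseq numSubseq_alt
  simp only [PySem.List.len_eq]
  have hmono := pvMono_sorted nums
  rw [pvLoopA_eq (PySem.List.sorted nums (fun x => x)) target hmono
        ((PySem.List.sorted nums (fun x => x)).length : Int).toNat 0
        ((PySem.List.sorted nums (fun x => x)).length - 1) 0 (by omega) le_rfl (by omega)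
        (by intro j h1 h2; omega)]
  have hbody : (fun (res l : Int) =>
      if numSubseqSearch (PySem.List.sorted nums (fun x => x))
           (target - PySem.List.pyGetD (PySem.List.sorted nums (fun x => x)) l 0)
           ((PySem.List.sorted nums (fun x => x)).length : Int).toNat 0
           ((PySem.List.sorted nums (fun x => x)).length : Int) - 1 ≥ l then
        res + PySem.Int.powMod 2
          (numSubseqSearch (PySem.List.sorted nums (fun x => x))
             (target - PySem.List.pyGetD (PySem.List.sorted nums (fun x => x)) l 0)
             ((PySem.List.sorted nums (fun x => x)).length : Int).toNat 0
             ((PySem.List.sorted nums (fun x => x)).length : Int) - 1 - l).toNat (10 ^ 9 + 7)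
      else res) = pvBody (PySem.List.sorted nums (fun x => x)) target := rfl
  rw [hbody]
  have h0 : ((0 : Nat) : Int) = (0 : Int) := rfl
  rw [← h0, pvFoldB_eq (PySem.List.sorted nums (fun x => x)) target
        (PySem.List.sorted nums (fun x => x)).length 0 ((0:Nat):Int) (by omega)]
  norm_num
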